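-- pv_equiv track=rewrite | github.com/antoniovilela/ForwardAnalysis-Ref | Utilities/python/PFCandidateNoiseStringCut.py | pFlowId
-- ===== SOURCE A (Python) =====
-- def pFlowId(name):
--     types = ("X", "h", "e", "mu", "gamma", "h0", "h_HF", "egamma_HF")
--     labels = {}
--     labels["X"] = ("X","undefined")
--     labels["h"] = ("h","chargedHadron","hadronCharged")
--     labels["e"] = ("e","electron")
--     labels["mu"] = ("mu","muon")
--     labels["gamma"] = ("gamma","photon")
--     labels["h0"] = ("h0","neutralHadron","hadronNeutral")
--     labels["h_HF"] = ("h_HF","hadronHF")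
--     labels["egamma_HF"] = ("egamma_HF","emHF");
--
--     id = -1
--     for type in types:
--         if name in labels[type]:
--             id = types.index(type)
--             break
--
--     return id
-- ===== SOURCE B (Python) =====
-- def pFlowId(name):
--     # Decision tree: branch on the first character, then confirm with direct
--     # string comparisons; no tuples, dicts or scans. Default is -1.
--     if not name:
--         return -1
--     c = name[0]
--     if c == 'X':
--         return 0 if name == "X" else -1
--     if c == 'u':
--         return 0 if name == "undefined" else -1
--     if c == 'c':
--         return 1 if name == "chargedHadron" else -1
--     if c == 'h':
--         if name == "h" or name == "hadronCharged":
--             return 1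
--         if name == "h0" or name == "hadronNeutral":
--             return 5
--         if name == "h_HF" or name == "hadronHF":
--             return 6
--         return -1
--     if c == 'e':
--         if name == "e" or name == "electron":
--             return 2
--         if name == "egamma_HF" or name == "emHF":
--             return 7
--         return -1
--     if c == 'm':
--         return 3 if name == "mu" or name == "muon" else -1
--     if c == 'n':
--         return 5 if name == "neutralHadron" else -1
--     if c == 'g':
--         return 4 if name == "gamma" else -1
--     if c == 'p':
--         return 4 if name == "photon" else -1
--     return -1
-- ===== Notes on version B (the rewrite author's own statement) =====
-- stated objective: alternative
-- what changed: Replaces A's tuple/dict category scan (membership tests plus types.index) with a hand-written decision tree: branch on the first character of the name, then confirm with direct string comparisons; no containers are built or scanned.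
import Mathlib
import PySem

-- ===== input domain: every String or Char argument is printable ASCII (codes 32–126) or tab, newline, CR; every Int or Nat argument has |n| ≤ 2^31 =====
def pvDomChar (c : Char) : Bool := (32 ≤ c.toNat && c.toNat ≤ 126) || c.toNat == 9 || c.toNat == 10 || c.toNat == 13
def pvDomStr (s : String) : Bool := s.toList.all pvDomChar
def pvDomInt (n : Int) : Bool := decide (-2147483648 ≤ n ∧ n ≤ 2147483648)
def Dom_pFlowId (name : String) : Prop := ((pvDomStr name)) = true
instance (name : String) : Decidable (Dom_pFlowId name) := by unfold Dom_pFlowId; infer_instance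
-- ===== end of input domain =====

-- B replaces A's per-call scan over category tuples with a first-character decision tree of direct string comparisons; same return value everywhere.

-- ===== PORT A =====
def pFlowTypesA : List String := ["X", "h", "e", "mu", "gamma", "h0", "h_HF", "egamma_HF"]

def pFlowLabelsA : PySem.Dict String (List String) :=
  ((((((((PySem.Dict.empty.insert "X" ["X","undefined"]).insert
    "h" ["h","chargedHadron","hadronCharged"]).insert
    "e" ["e","electron"]).insert
    "mu" ["mu","muon"]).insert
    "gamma" ["gamma","photon"]).insert
    "h0" ["h0","neutralHadron","hadronNeutral"]).insert
    "h_HF" ["h_HF","hadronHF"]).insert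
    "egamma_HF" ["egamma_HF","emHF"])

-- the 'for type in types: if name in labels[type]: id = types.index(type); break' loop
def pFlowIdLoop (name : String) : List String → Int
  | [] => -1
  | t :: ts =>
    if name ∈ pFlowLabelsA.getD t [] then
      ((PySem.List.index? pFlowTypesA t).map (Int.ofNat ·)).getD (-1)
    else pFlowIdLoop name ts

def pFlowId (name : String) : Int := pFlowIdLoop name pFlowTypesA

-- ===== PORT B =====
-- Source B: 'if not name: return -1' then 'c = name[0]' — together exactly a match on name[0] (PySem.Str.pyGet? name 0)
def pFlowId_alt (name : String) : Int :=
  match PySem.Str.pyGet? name 0 with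
  | none => -1
  | some c =>
    if c = 'X' then (if name = "X" then 0 else -1)
    else if c = 'u' then (if name = "undefined" then 0 else -1)
    else if c = 'c' then (if name = "chargedHadron" then 1 else -1)
    else if c = 'h' then
      if name = "h" ∨ name = "hadronCharged" then 1
      else if name = "h0" ∨ name = "hadronNeutral" then 5
      else if name = "h_HF" ∨ name = "hadronHF" then 6
      else -1
    else if c = 'e' then
      if name = "e" ∨ name = "electron" then 2
      else if name = "egamma_HF" ∨ name = "emHF" then 7
      else -1
    else if c = 'm' then (if name = "mu" ∨ name = "muon" then 3 else -1)
    else if c = 'n' then (if name = "neutralHadron" then 5 else -1)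
    else if c = 'g' then (if name = "gamma" then 4 else -1)
    else if c = 'p' then (if name = "photon" then 4 else -1)
    else -1

-- ===== PRECONDITION & SPEC =====
def Spec_pFlowId (name : String) (out : Int) : Prop := out = pFlowId_alt name
instance (name : String) (out : Int) : Decidable (Spec_pFlowId name out) := by unfold Spec_pFlowId; infer_instance

-- ===== CLAIM (what is proved, stated in full; the proofs are below) =====
def Claim_equal_pFlowId : Prop := ∀ (name : String), Dom_pFlowId name → Spec_pFlowId name (pFlowId name)

-- ===== LEMMAS AND PROOFS =====

-- ===== VERDICT (by name: the statement is the Claim_ definition above) =====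
theorem pFlowId_spec : Claim_equal_pFlowId := by
  intro name _
  unfold Spec_pFlowId
  rcases eq_or_ne name "X" with h0|h0
  · subst h0; decide
  rcases eq_or_ne name "undefined" with h1|h1
  · subst h1; decide
  rcases eq_or_ne name "h" with h2|h2
  · subst h2; decide
  rcases eq_or_ne name "chargedHadron" with h3|h3
  · subst h3; decide
  rcases eq_or_ne name "hadronCharged" with h4|h4
  · subst h4; decide
  rcases eq_or_ne name "e" with h5|h5
  · subst h5; decide
  rcases eq_or_ne name "electron" with h6|h6
  · subst h6; decide
  rcases eq_or_ne name "mu" with h7|h7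
  · subst h7; decide
  rcases eq_or_ne name "muon" with h8|h8
  · subst h8; decide
  rcases eq_or_ne name "gamma" with h9|h9
  · subst h9; decide
  rcases eq_or_ne name "photon" with h10|h10
  · subst h10; decide
  rcases eq_or_ne name "h0" with h11|h11
  · subst h11; decide
  rcases eq_or_ne name "neutralHadron" with h12|h12
  · subst h12; decide
  rcases eq_or_ne name "hadronNeutral" with h13|h13
  · subst h13; decide
  rcases eq_or_ne name "h_HF" with h14|h14
  · subst h14; decide
  rcases eq_or_ne name "hadronHF" with h15|h15
  · subst h15; decide
  rcases eq_or_ne name "egamma_HF" with h16|h16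
  · subst h16; decide
  rcases eq_or_ne name "emHF" with h17|h17
  · subst h17; decide
  have g0 : ¬("X" = name) := fun e => h0 e.symm
  have g1 : ¬("undefined" = name) := fun e => h1 e.symm
  have g2 : ¬("h" = name) := fun e => h2 e.symm
  have g3 : ¬("chargedHadron" = name) := fun e => h3 e.symm
  have g4 : ¬("hadronCharged" = name) := fun e => h4 e.symm
  have g5 : ¬("e" = name) := fun e => h5 e.symm
  have g6 : ¬("electron" = name) := fun e => h6 e.symm
  have g7 : ¬("mu" = name) := fun e => h7 e.symm
  have g8 : ¬("muon" = name) := fun e => h8 e.symm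
  have g9 : ¬("gamma" = name) := fun e => h9 e.symm
  have g10 : ¬("photon" = name) := fun e => h10 e.symm
  have g11 : ¬("h0" = name) := fun e => h11 e.symm
  have g12 : ¬("neutralHadron" = name) := fun e => h12 e.symm
  have g13 : ¬("hadronNeutral" = name) := fun e => h13 e.symm
  have g14 : ¬("h_HF" = name) := fun e => h14 e.symm
  have g15 : ¬("hadronHF" = name) := fun e => h15 e.symm
  have g16 : ¬("egamma_HF" = name) := fun e => h16 e.symm
  have g17 : ¬("emHF" = name) := fun e => h17 e.symm
  have b0 : ("X" == name) = false := beq_eq_false_iff_ne.mpr g0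
  have b1 : ("undefined" == name) = false := beq_eq_false_iff_ne.mpr g1
  have b2 : ("h" == name) = false := beq_eq_false_iff_ne.mpr g2
  have b3 : ("chargedHadron" == name) = false := beq_eq_false_iff_ne.mpr g3
  have b4 : ("hadronCharged" == name) = false := beq_eq_false_iff_ne.mpr g4
  have b5 : ("e" == name) = false := beq_eq_false_iff_ne.mpr g5
  have b6 : ("electron" == name) = false := beq_eq_false_iff_ne.mpr g6
  have b7 : ("mu" == name) = false := beq_eq_false_iff_ne.mpr g7
  have b8 : ("muon" == name) = false := beq_eq_false_iff_ne.mpr g8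
  have b9 : ("gamma" == name) = false := beq_eq_false_iff_ne.mpr g9
  have b10 : ("photon" == name) = false := beq_eq_false_iff_ne.mpr g10
  have b11 : ("h0" == name) = false := beq_eq_false_iff_ne.mpr g11
  have b12 : ("neutralHadron" == name) = false := beq_eq_false_iff_ne.mpr g12
  have b13 : ("hadronNeutral" == name) = false := beq_eq_false_iff_ne.mpr g13
  have b14 : ("h_HF" == name) = false := beq_eq_false_iff_ne.mpr g14
  have b15 : ("hadronHF" == name) = false := beq_eq_false_iff_ne.mpr g15
  have b16 : ("egamma_HF" == name) = false := beq_eq_false_iff_ne.mpr g16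
  have b17 : ("emHF" == name) = false := beq_eq_false_iff_ne.mpr g17
  rcases hc : PySem.Str.pyGet? name 0 with _ | c <;>
    simp [*, pFlowId, pFlowId_alt, pFlowIdLoop, pFlowLabelsA, pFlowTypesA,
      PySem.Dict.getD, PySem.Dict.get?, PySem.Dict.insert, PySem.Dict.empty, List.find?] <;>
    cases PySem.List.pyGet? name.toList 0 <;> rfl
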